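-- pv_equiv track=rewrite | github.com/apbaranova/study-os-intro-2022 | python/Python/Lesson 5/2.py | poli
-- ===== SOURCE A (Python) =====
-- def poli(n):
--     k = n
--     l = 0
--     while k > 0:
--         l = l * 10
--         l += k % 10
--         k //= 10
--     if n == l:
--         return 1
--     else:
--         return 0
-- ===== SOURCE B (Python) =====
-- def poli(n):
--     s = str(n)
--     return 1 if s == s[::-1] else 0
-- ===== Notes on version B (the rewrite author's own statement) =====
-- stated objective: idiomatic
-- what changed: Replaces A's arithmetic digit-reversal loop (mod 10 / floor-div accumulation) with building the decimal string and comparing it to its slice-reversal s[::-1].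
import Mathlib
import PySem

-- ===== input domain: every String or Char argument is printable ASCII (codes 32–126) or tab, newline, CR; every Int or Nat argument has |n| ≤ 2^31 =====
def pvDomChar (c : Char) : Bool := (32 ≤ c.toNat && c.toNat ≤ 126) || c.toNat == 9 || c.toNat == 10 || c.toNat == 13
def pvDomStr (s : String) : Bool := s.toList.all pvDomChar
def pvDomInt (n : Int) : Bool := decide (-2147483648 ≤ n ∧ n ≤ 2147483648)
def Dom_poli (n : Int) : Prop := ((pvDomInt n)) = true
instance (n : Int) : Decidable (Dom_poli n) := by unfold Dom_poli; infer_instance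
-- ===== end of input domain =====

-- B replaces A's arithmetic digit-reversal loop with a decimal-string / slice-reversal comparison (idiomatic, same cost).

-- ===== PORT A =====
-- while k > 0: l = l*10; l += k % 10; k //= 10
def poliLoop (k l : Int) : Int :=
  if 0 < k then
    poliLoop (PySem.Int.floordiv k 10) (l * 10 + PySem.Int.mod k 10)
  else l
termination_by k.toNat
decreasing_by
  simp only [PySem.Int.floordiv, Int.fdiv_eq_ediv]
  simp only [show ((0:Int) ≤ 10 ∨ (10:Int) ∣ k) from Or.inl (by norm_num), if_true]
  omega

def poli (n : Int) : Int :=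
  let k := n
  let l := poliLoop k 0
  if n = l then 1 else 0

-- ===== PORT B =====
-- s = str(n); 1 if s == s[::-1] else 0
def poli_alt (n : Int) : Int :=
  let s := PySem.Int.toStr n
  if some s = PySem.Str.slice? s none none (-1) then 1 else 0

-- ===== PRECONDITION & SPEC =====
def Spec_poli (n : Int) (out : Int) : Prop := out = poli_alt n
instance (n : Int) (out : Int) : Decidable (Spec_poli n out) := by unfold Spec_poli; infer_instance

-- ===== CLAIM (what is proved, stated in full; the proofs are below) =====
def Claim_equal_poli : Prop := ∀ (n : Int), Dom_poli n → Spec_poli n (poli n)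

-- ===== LEMMAS AND PROOFS =====

-- A's loop on a natural number computes l·10^(#digits) + the digit-reversed value.
theorem poliLoop_natCast (m : Nat) : ∀ l : Int,
    poliLoop (m : Int) l
      = l * 10 ^ (Nat.digits 10 m).length
        + ((Nat.ofDigits 10 (Nat.digits 10 m).reverse : Nat) : Int) := by
  induction m using Nat.strong_induction_on with
  | _ m ih =>
    intro l
    rcases Nat.eq_zero_or_pos m with hm | hm
    · subst hm
      rw [poliLoop]
      simp
    · rw [poliLoop]
      have hpos : (0 : Int) < (m : Int) := by exact_mod_cast hm
      rw [if_pos hpos]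
      have hfd : PySem.Int.floordiv (m : Int) 10 = ((m / 10 : Nat) : Int) := by
        simp [PySem.Int.floordiv, Int.fdiv_eq_ediv]
      have hmod : PySem.Int.mod (m : Int) 10 = ((m % 10 : Nat) : Int) := by
        simp [PySem.Int.mod, Int.fmod_eq_emod]
      rw [hfd, hmod, ih (m / 10) (Nat.div_lt_self hm (by norm_num))]
      rw [Nat.digits_def' (by norm_num : 1 < 10) hm]
      simp only [List.reverse_cons, List.length_cons]
      rw [Nat.ofDigits_append]
      push_cast [Nat.ofDigits_cons, Nat.ofDigits_nil, List.length_reverse]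
      ring

-- base-10 representations of equal length are unique
theorem ofDigits_inj (L1 : List Nat) : ∀ L2 : List Nat, L1.length = L2.length →
    (∀ x ∈ L1, x < 10) → (∀ x ∈ L2, x < 10) →
    Nat.ofDigits 10 L1 = Nat.ofDigits 10 L2 → L1 = L2 := by
  induction L1 with
  | nil => intro L2 hlen _ _ _; cases L2 <;> simp_all
  | cons a t ih =>
    intro L2 hlen h1 h2 heq
    cases L2 with
    | nil => simp at hlen
    | cons b t2 =>
      simp only [Nat.ofDigits_cons] at heq
      have ha : a < 10 := h1 a (by simp)
      have hb : b < 10 := h2 b (by simp)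
      have hab : a = b ∧ Nat.ofDigits 10 t = Nat.ofDigits 10 t2 := by omega
      have := ih t2 (by simpa using hlen) (fun x hx => h1 x (by simp [hx]))
        (fun x hx => h2 x (by simp [hx])) hab.2
      simp [hab.1, this]

theorem digitChar_ne_dash {x : Nat} (hx : x < 10) : Nat.digitChar x ≠ '-' := by
  interval_cases x <;> decide

theorem map_digitChar_inj (L1 : List Nat) : ∀ L2 : List Nat,
    (∀ x ∈ L1, x < 10) → (∀ x ∈ L2, x < 10) →
    L1.map Nat.digitChar = L2.map Nat.digitChar → L1 = L2 := by
  induction L1 with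
  | nil => intro L2 _ _ h; cases L2 <;> simp_all
  | cons a t ih =>
    intro L2 h1 h2 h
    cases L2 with
    | nil => simp at h
    | cons b t2 =>
      simp only [List.map_cons, List.cons.injEq] at h
      have ha : a < 10 := h1 a (by simp)
      have hb : b < 10 := h2 b (by simp)
      have hab : a = b := by
        interval_cases a <;> interval_cases b <;> first | rfl | exact absurd h.1 (by decide)
      have := ih t2 (fun x hx => h1 x (by simp [hx])) (fun x hx => h2 x (by simp [hx])) h.2
      simp [hab, this]

-- Nat.toDigits via Nat.digits, for positive input
theorem toDigitsCore_eq (f : Nat) : ∀ (m : Nat) (acc : List Char), 0 < m → m < f →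
    Nat.toDigitsCore 10 f m acc
      = ((Nat.digits 10 m).map Nat.digitChar).reverse ++ acc := by
  induction f with
  | zero => intro m acc _ hf; omega
  | succ f ih =>
    intro m acc hm hf
    rw [Nat.toDigitsCore]
    rw [Nat.digits_def' (by norm_num : 1 < 10) hm]
    by_cases h0 : m / 10 = 0
    · simp [h0, Nat.digits_zero]
    · rw [if_neg h0]
      rw [ih (m / 10) _ (Nat.pos_of_ne_zero h0)
        (by have := Nat.div_lt_self hm (by norm_num : 1 < 10); omega)]
      simp

theorem toDigits_eq (m : Nat) (hm : 0 < m) :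
    Nat.toDigits 10 m = ((Nat.digits 10 m).map Nat.digitChar).reverse := by
  have := toDigitsCore_eq (m + 1) m [] hm (by omega)
  simpa [Nat.toDigits] using this

-- B's test, restated on the character list
theorem poli_alt_eq (n : Int) :
    poli_alt n = if PySem.Int.toChars n = (PySem.Int.toChars n).reverse then 1 else 0 := by
  show (if some (PySem.Int.toStr n) = PySem.Str.slice? (PySem.Int.toStr n) none none (-1)
        then (1:Int) else 0) = _
  rw [PySem.Str.slice?_none_none_neg_one]
  congr 1
  simp only [eq_iff_iff, Option.some.injEq]
  rw [PySem.Int.toList_toStr]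
  constructor
  · intro h
    have := congrArg String.toList h
    simpa [String.toList_ofList, PySem.Int.toList_toStr] using this
  · intro h
    conv_lhs => rw [← String.ofList_toList (s := PySem.Int.toStr n),
      PySem.Int.toList_toStr]
    rw [← h]

theorem poli_eq (n : Int) : poli n = if n = poliLoop n 0 then 1 else 0 := rfl

theorem poliLoop_nonpos {k : Int} (hk : ¬ 0 < k) (l : Int) : poliLoop k l = l := by
  rw [poliLoop, if_neg hk]

theorem poli_spec_aux (n : Int) : poli n = poli_alt n := by
  rw [poli_alt_eq, poli_eq]
  rcases lt_trichotomy n 0 with hneg | hzero | hpos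
  · -- negative: both sides are 0
    rw [poliLoop_nonpos (by omega), if_neg (by omega)]
    have hchars : PySem.Int.toChars n = '-' :: Nat.toDigits 10 n.natAbs := by
      unfold PySem.Int.toChars
      rw [if_pos hneg]
    rw [hchars, if_neg]
    intro h
    have hpos' : 0 < n.natAbs := by omega
    have hds : Nat.toDigits 10 n.natAbs
        = ((Nat.digits 10 n.natAbs).map Nat.digitChar).reverse := toDigits_eq _ hpos'
    have hne : Nat.toDigits 10 n.natAbs ≠ [] := by
      rw [hds]
      simp only [ne_eq, List.reverse_eq_nil_iff, List.map_eq_nil_iff,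
        Nat.digits_ne_nil_iff_ne_zero]
      omega
    obtain ⟨c, cs, hcons⟩ := List.exists_cons_of_ne_nil
      (show (Nat.toDigits 10 n.natAbs).reverse ≠ [] by simpa using hne)
    rw [List.reverse_cons, hcons] at h
    -- heads: '-' = c
    have hc : c = '-' := by
      have := congrArg List.head? h
      simpa using this.symm
    have hcmem : c ∈ Nat.toDigits 10 n.natAbs := by
      have : c ∈ (Nat.toDigits 10 n.natAbs).reverse := by rw [hcons]; simp
      simpa using this
    rw [hds] at hcmem
    simp only [List.mem_reverse, List.mem_map] at hcmem
    obtain ⟨d, hd, hdc⟩ := hcmem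
    have hdlt : d < 10 := Nat.digits_lt_base (by norm_num) hd
    exact digitChar_ne_dash hdlt (by rw [hdc, hc])
  · subst hzero
    have h0 : PySem.Int.toChars 0 = ['0'] := by decide
    rw [poliLoop_nonpos (by omega)]
    simp [h0]
  · -- positive
    set m := n.toNat with hm
    have hn : (m : Int) = n := Int.toNat_of_nonneg (by omega)
    have hmpos : 0 < m := by omega
    rw [← hn]
    rw [poliLoop_natCast m 0]
    simp only [zero_mul, zero_add]
    have hchars : PySem.Int.toChars ((m : Nat) : Int) = Nat.toDigits 10 m := by
      unfold PySem.Int.toChars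
      rw [if_neg (by omega : ¬ ((m : Nat) : Int) < 0), Int.toNat_natCast]
    rw [hchars, toDigits_eq m hmpos]
    have hlt : ∀ x ∈ Nat.digits 10 m, x < 10 := fun x hx =>
      Nat.digits_lt_base (by norm_num) hx
    congr 1
    simp only [eq_iff_iff, List.reverse_reverse]
    constructor
    · intro h
      have hmr : m = Nat.ofDigits 10 (Nat.digits 10 m).reverse := by exact_mod_cast h
      have hpal : Nat.digits 10 m = (Nat.digits 10 m).reverse := by
        apply ofDigits_inj _ _ (by simp) hlt (by simpa using hlt)
        rw [Nat.ofDigits_digits]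
        exact hmr
      calc ((Nat.digits 10 m).map Nat.digitChar).reverse
          = ((Nat.digits 10 m).reverse.map Nat.digitChar).reverse := by rw [← hpal]
        _ = (Nat.digits 10 m).map Nat.digitChar := by simp
    · intro h
      have hrev : (Nat.digits 10 m).reverse = Nat.digits 10 m := by
        apply map_digitChar_inj _ _ (by simpa using hlt) hlt
        have := congrArg List.reverse h
        simpa using this.symm
      rw [hrev, Nat.ofDigits_digits, hn]

-- ===== VERDICT (by name: the statement is the Claim_ definition above) =====
theorem poli_spec : Claim_equal_poli := by
  intro n _
  unfold Spec_poli
  exact poli_spec_aux n
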